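-- pv_equiv track=rewrite | github.com/HLTCHKUST/ke-dialogue | knowledge_embed/mwoz/generate_delex_MWOZ_TRAIN.py | convert_time_int_to_time
-- ===== SOURCE A (Python) =====
-- def convert_time_int_to_time(all_rows,clmn):#leaveAt_id,arriveBy_id):
--     leaveAt_id = -1
--     arriveBy_id = -1
--     if('leaveAt' in clmn):
--         leaveAt_id = clmn.index('leaveAt')
--     if('arriveBy' in clmn):
--         arriveBy_id = clmn.index('arriveBy')
--     if(leaveAt_id!= -1):
--         for i in range(len(all_rows)):
--             all_rows[i] = list(all_rows[i])
--             time = int(all_rows[i][leaveAt_id])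
--             mins=int(time%60)
--             hours=int(time/60)
--             if(len(str(hours)))==1: hours = "0"+str(hours)
--             if(len(str(mins)))==1: mins = "0"+str(mins)
--             all_rows[i][leaveAt_id] = str(hours)+str(mins)
--     if(arriveBy_id!= -1):
--         for i in range(len(all_rows)):
--             all_rows[i] = list(all_rows[i])
--             time = int(all_rows[i][arriveBy_id])
--             mins=int(time%60)
--             hours=int(time/60)
--             if(len(str(hours)))==1: hours = "0"+str(hours)
--             if(len(str(mins)))==1: mins = "0"+str(mins)
--             all_rows[i][arriveBy_id] = str(hours)+str(mins)
--     return all_rows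
-- ===== SOURCE B (Python) =====
-- def convert_time_int_to_time(all_rows, clmn):
--     # Memoized rewrite: find the present time columns once, build a conversion
--     # table keyed by the cell STRING (each distinct time string is parsed and
--     # formatted exactly once), then rewrite every row by table lookup.
--     # Mutates all_rows in place like the original (same returned value).
--     ids = [clmn.index(name) for name in ('leaveAt', 'arriveBy') if name in clmn]
--     table = {}
--     for row in all_rows:
--         for j in ids:
--             s = row[j]
--             if s not in table:
--                 t = int(s)
--                 table[s] = str(int(t / 60)).zfill(2) + str(t % 60).zfill(2)
--     for i in range(len(all_rows)):
--         row = list(all_rows[i])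
--         for j in ids:
--             row[j] = table[row[j]]
--         all_rows[i] = row
--     return all_rows
-- ===== Notes on version B (the rewrite author's own statement) =====
-- stated objective: alternative
-- what changed: A runs two separate whole-table passes (one per time column), parsing and formatting every cell it touches; B builds a memo dict once, converting each DISTINCT time string to HHMM exactly once, and then rewrites the rows by dict lookup.
import Mathlib
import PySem

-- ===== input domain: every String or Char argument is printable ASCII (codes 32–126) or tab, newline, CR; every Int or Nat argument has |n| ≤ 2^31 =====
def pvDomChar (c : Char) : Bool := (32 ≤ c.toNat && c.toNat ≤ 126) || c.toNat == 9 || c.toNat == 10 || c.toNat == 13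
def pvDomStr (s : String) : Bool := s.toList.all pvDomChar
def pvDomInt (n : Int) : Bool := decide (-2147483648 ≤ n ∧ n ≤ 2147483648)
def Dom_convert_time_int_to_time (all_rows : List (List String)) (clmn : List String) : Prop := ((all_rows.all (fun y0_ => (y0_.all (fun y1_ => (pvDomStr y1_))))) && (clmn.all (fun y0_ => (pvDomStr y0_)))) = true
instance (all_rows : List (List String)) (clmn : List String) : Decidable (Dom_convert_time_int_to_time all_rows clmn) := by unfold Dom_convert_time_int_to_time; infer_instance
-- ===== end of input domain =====

-- B replaces A's two duplicated per-column table passes (re-parsing and re-formatting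
-- every cell) by a memo dict built once — each DISTINCT time string is converted once,
-- then rows are rewritten by lookup (objective: alternative).
-- Both A and B mutate all_rows in place in Python; the equivalence proved here is
-- about the RETURN value (identical to the mutated argument in both).

-- ===== PORT A =====
-- exact port of Python's `int(t / 60)` (an expression BOTH Source A and Source B contain):
-- int/int true division yields the IEEE-754 round-to-nearest-even double of t/60,
-- int() then truncates toward zero; computed here exactly with integer arithmetic.
-- (Pre_ keeps |t| below the OverflowError threshold of the float division.)
def pvIntDivFloat60 (t : Int) : Int :=
  if t = 0 then 0 else
    let n : Nat := t.natAbs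
    let N : Nat := n * 2 ^ 60                 -- scale so the exponent stays a Nat
    let c : Nat := Nat.log2 N
    let w : Nat := if N < 60 * 2 ^ (c - 5) then c - 58 else c - 57   -- 60·2^(52+w) ≤ N < 60·2^(53+w)
    let D : Nat := 60 * 2 ^ w
    let m0 : Nat := N / D
    let r : Nat := N % D
    let m : Nat :=                            -- 53-bit significand, round half to even
      if 2 * r < D then m0
      else if D < 2 * r then m0 + 1
      else if m0 % 2 = 0 then m0 else m0 + 1
    let a : Nat := if 60 ≤ w then m * 2 ^ (w - 60) else m / 2 ^ (60 - w)   -- truncate m·2^(w-60)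
    if t < 0 then -(a : Int) else (a : Int)

-- the loop body: time = int(cell); mins = int(time%60); hours = int(time/60); pad; concat
def pvFmtA (time : Int) : String :=
  let mins : Int := PySem.Int.mod time 60                 -- int(time%60): int() of an int is the identity
  let hours : Int := pvIntDivFloat60 time                 -- int(time/60)
  let hoursS : String :=
    if PySem.Str.len (PySem.Int.toStr hours) = 1 then "0" ++ PySem.Int.toStr hours else PySem.Int.toStr hours
  let minsS : String :=
    if PySem.Str.len (PySem.Int.toStr mins) = 1 then "0" ++ PySem.Int.toStr mins else PySem.Int.toStr mins
  hoursS ++ minsS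

-- one of A's two column passes: 'for i in range(len(all_rows)): all_rows[i] = list(all_rows[i]); …'
-- (list(row) is the identity on the List port; each iteration rewrites row i independently, hence a map)
def pvPassA (rows : List (List String)) (cid : Int) : List (List String) :=
  rows.map (fun row =>
    match PySem.List.pyGet? row cid with
    | none => row                                   -- IndexError: excluded by Pre_
    | some s =>
      match PySem.Int.ofStr? s with
      | none => row                                 -- ValueError of int(...): excluded by Pre_
      | some t => row.set cid.toNat (pvFmtA t))

def convert_time_int_to_time (all_rows : List (List String)) (clmn : List String) : List (List String) :=
  -- clmn.index(name) under the membership guard = List.idxOf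
  let leaveAt_id : Int := if "leaveAt" ∈ clmn then ((clmn.idxOf "leaveAt" : Nat) : Int) else -1
  let arriveBy_id : Int := if "arriveBy" ∈ clmn then ((clmn.idxOf "arriveBy" : Nat) : Int) else -1
  let rows1 := if leaveAt_id ≠ -1 then pvPassA all_rows leaveAt_id else all_rows
  let rows2 := if arriveBy_id ≠ -1 then pvPassA rows1 arriveBy_id else rows1
  rows2

-- ===== PORT B =====
-- table[s] = str(int(t / 60)).zfill(2) + str(t % 60).zfill(2)
def pvHHMM (t : Int) : String :=
  PySem.Str.zfill (PySem.Int.toStr (pvIntDivFloat60 t)) 2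
    ++ PySem.Str.zfill (PySem.Int.toStr (PySem.Int.mod t 60)) 2

-- body of the table-building loop: s = row[j]; if s not in table: table[s] = …
def pvTabStep (row : List String) (tb : PySem.Dict String String) (j : Nat) : PySem.Dict String String :=
  match row[j]? with
  | none => tb                                      -- IndexError: excluded by Pre_
  | some s =>
    if (tb.get? s).isSome then tb
    else
      match PySem.Int.ofStr? s with
      | none => tb                                  -- ValueError of int(s): excluded by Pre_
      | some t => tb.insert s (pvHHMM t)

def pvBuildTable (all_rows : List (List String)) (ids : List Nat) : PySem.Dict String String :=
  all_rows.foldl (fun tb row => ids.foldl (pvTabStep row) tb) PySem.Dict.empty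

-- body of the rewrite loop: row[j] = table[row[j]]
def pvLookStep (tb : PySem.Dict String String) (row : List String) (j : Nat) : List String :=
  match row[j]? with
  | none => row                                     -- IndexError: excluded by Pre_
  | some v =>
    match tb.get? v with
    | none => row                                   -- KeyError: unreachable under Pre_
    | some w => row.set j w

def convert_time_int_to_time_alt (all_rows : List (List String)) (clmn : List String) : List (List String) :=
  -- ids = [clmn.index(name) for name in ('leaveAt', 'arriveBy') if name in clmn]
  let ids : List Nat := (["leaveAt", "arriveBy"].filter (· ∈ clmn)).map (fun name => clmn.idxOf name)
  let table := pvBuildTable all_rows ids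
  all_rows.map (fun row => ids.foldl (pvLookStep table) row)

-- ===== PRECONDITION & SPEC =====
-- Pre_ excludes exactly the inputs on which Python A raises: a present time column whose
-- index is missing from some row (IndexError), a cell int() cannot parse (ValueError), or a
-- parsed value with |t| ≥ 60·(2^1024 − 2^970), where the float division t/60 overflows
-- (OverflowError).
def pvCellOK (row : List String) (j : Nat) : Bool :=
  match row[j]? with
  | none => false
  | some s =>
    match PySem.Int.ofStr? s with
    | none => false
    | some t => t.natAbs < 10786158809173894847623738284318204904796047962602269616170426738826698097565885056798941078655232425779817185001573274656793332871116424157839449320290349240914534120042503020576431290749062691905868543816204191334282017577370574889191650096188517563144450106661930642260562693581970485582572810674250469867520  -- = 60 * (2^1024 - 2^970), written as a numeral so `decide` needs no deep recursion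

def Pre_convert_time_int_to_time (all_rows : List (List String)) (clmn : List String) : Prop :=
  ("leaveAt" ∈ clmn → ∀ row ∈ all_rows, pvCellOK row (clmn.idxOf "leaveAt") = true) ∧
  ("arriveBy" ∈ clmn → ∀ row ∈ all_rows, pvCellOK row (clmn.idxOf "arriveBy") = true)

instance (all_rows : List (List String)) (clmn : List String) : Decidable (Pre_convert_time_int_to_time all_rows clmn) := by
  unfold Pre_convert_time_int_to_time; infer_instance

def pvWitness_convert_time_int_to_time : List (List String) × List String :=
  ([["61", "x"], ["-5", "y"]], ["leaveAt", "name"])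

def Spec_convert_time_int_to_time (all_rows : List (List String)) (clmn : List String) (out : List (List String)) : Prop := out = convert_time_int_to_time_alt all_rows clmn
instance (all_rows : List (List String)) (clmn : List String) (out : List (List String)) : Decidable (Spec_convert_time_int_to_time all_rows clmn out) := by unfold Spec_convert_time_int_to_time; infer_instance

-- ===== CLAIM (what is proved, stated in full; the proofs are below) =====
def Claim_equal_convert_time_int_to_time : Prop := ∀ (all_rows : List (List String)) (clmn : List String), Dom_convert_time_int_to_time all_rows clmn → Pre_convert_time_int_to_time all_rows clmn → Spec_convert_time_int_to_time all_rows clmn (convert_time_int_to_time all_rows clmn)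

-- ===== LEMMAS AND PROOFS =====

theorem pvDigitChar_ne (k : Nat) : Nat.digitChar k ≠ '+' ∧ Nat.digitChar k ≠ '-' := by
  match k with
  | 0 | 1 | 2 | 3 | 4 | 5 | 6 | 7 | 8 | 9 | 10 | 11 | 12 | 13 | 14 | 15 => decide
  | (n + 16) =>
    have h : Nat.digitChar (n + 16) = '*' := by
      unfold Nat.digitChar
      repeat rw [if_neg (by omega)]
    rw [h]; decide

theorem pvToDigitsCore_ne (b : Nat) (f : Nat) : ∀ (n : Nat) (ds : List Char),
    (∀ c ∈ ds, c ≠ '+' ∧ c ≠ '-') → ∀ c ∈ Nat.toDigitsCore b f n ds, c ≠ '+' ∧ c ≠ '-' := by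
  induction f with
  | zero => intro n ds h c hc; exact h c hc
  | succ f ih =>
    intro n ds h c hc
    simp only [Nat.toDigitsCore] at hc
    split at hc
    · rcases List.mem_cons.mp hc with hc | hc
      · subst hc; exact pvDigitChar_ne _
      · exact h c hc
    · refine ih _ _ ?_ c hc
      intro d hd
      rcases List.mem_cons.mp hd with hd | hd
      · subst hd; exact pvDigitChar_ne _
      · exact h d hd

theorem pvToDigitsCore_len (b : Nat) (f : Nat) : ∀ (n : Nat) (ds : List Char),
    ds.length ≤ (Nat.toDigitsCore b f n ds).length := by
  induction f with
  | zero => intro n ds; simp [Nat.toDigitsCore]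
  | succ f ih =>
    intro n ds
    simp only [Nat.toDigitsCore]
    split
    · simp
    · calc ds.length ≤ (Nat.digitChar (n % b) :: ds).length := by simp
        _ ≤ _ := ih _ _

theorem pvToDigits_ne_nil (b n : Nat) : Nat.toDigits b n ≠ [] := by
  intro h
  have hlen := pvToDigitsCore_len b n (n / b) [Nat.digitChar (n % b)]
  unfold Nat.toDigits at h
  simp only [Nat.toDigitsCore] at h
  split at h
  · exact List.cons_ne_nil _ _ h
  · rw [h] at hlen; simp at hlen

theorem pvToChars_ne_nil (n : Int) : PySem.Int.toChars n ≠ [] := by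
  unfold PySem.Int.toChars
  split
  · exact List.cons_ne_nil _ _
  · exact pvToDigits_ne_nil _ _

theorem pvToChars_singleton (n : Int) (c : Char) (h : PySem.Int.toChars n = [c]) :
    c ≠ '+' ∧ c ≠ '-' := by
  unfold PySem.Int.toChars at h
  split at h
  · exfalso
    have : Nat.toDigits 10 n.natAbs = [] := by
      have := congrArg List.tail h; simpa using this
    exact pvToDigits_ne_nil _ _ this
  · have hall := pvToDigitsCore_ne 10 (n.toNat + 1) n.toNat [] (by simp)
    refine hall c ?_
    unfold Nat.toDigits at h
    rw [h]; simp

-- A's length-1 zero padding of str(n) coincides with str(n).zfill(2)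
theorem pvPad_eq (n : Int) :
    (if PySem.Str.len (PySem.Int.toStr n) = 1 then "0" ++ PySem.Int.toStr n else PySem.Int.toStr n)
      = PySem.Str.zfill (PySem.Int.toStr n) 2 := by
  rw [← String.toList_inj]
  have hcs : (PySem.Int.toStr n).toList = PySem.Int.toChars n := PySem.Int.toList_toStr n
  rcases h : PySem.Int.toChars n with _ | ⟨c, rest⟩
  · exact absurd h (pvToChars_ne_nil n)
  · rcases rest with _ | ⟨d, rest2⟩
    · obtain ⟨hp, hm⟩ := pvToChars_singleton n c h
      have hlen : PySem.Str.len (PySem.Int.toStr n) = 1 := by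
        simp [PySem.Str.len, hcs, h]
      rw [if_pos hlen, String.toList_append, PySem.Str.toList_zfill, hcs, h]
      simp [PySem.Chars.zfill, hp, hm]
    · have hlen : PySem.Str.len (PySem.Int.toStr n) ≠ 1 := by
        simp [PySem.Str.len, hcs, h]; omega
      rw [if_neg hlen, PySem.Str.toList_zfill, hcs, h]
      have h2 : (2 : Int) ≤ (((c :: d :: rest2 : List Char)).length : Int) := by
        simp only [List.length_cons]; push_cast; omega
      unfold PySem.Chars.zfill
      rw [if_pos h2]

-- A's formatted cell is B's
theorem pvFmtA_eq (t : Int) : pvFmtA t = pvHHMM t := by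
  simp only [pvFmtA, pvHHMM, pvPad_eq]

-- the per-row effect both programs have on one OK cell (proof-side reference)
def pvCellConv (row : List String) (j : Nat) : List String :=
  match row[j]? with
  | none => row
  | some s =>
    match PySem.Int.ofStr? s with
    | none => row
    | some t => row.set j (pvHHMM t)

-- one A-pass at a Nat column index rewrites each row's cell
theorem pvPassA_eq (rows : List (List String)) (k : Nat) :
    pvPassA rows (k : Int) = rows.map (fun r => pvCellConv r k) := by
  unfold pvPassA pvCellConv
  refine List.map_congr_left ?_
  intro row _
  rw [PySem.List.pyGet?_natCast]
  cases hg : row[k]? with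
  | none => rfl
  | some s => simp only [Int.toNat_natCast, pvFmtA_eq]

theorem pvCellConv_eq (row : List String) (j : Nat) (s : String) (t : Int)
    (hg : row[j]? = some s) (hp : PySem.Int.ofStr? s = some t) :
    pvCellConv row j = row.set j (pvHHMM t) := by
  unfold pvCellConv
  rw [hg]
  show (match PySem.Int.ofStr? s with
        | none => row
        | some t => row.set j (pvHHMM t)) = row.set j (pvHHMM t)
  rw [hp]

theorem pvIdx_ne_neg_one (clmn : List String) (s : String) : ((clmn.idxOf s : Nat) : Int) ≠ -1 := by
  have := Int.natCast_nonneg (clmn.idxOf s)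
  omega

-- table invariant: every stored value is the formatted form of its (parseable) key
def pvTabInv (tb : PySem.Dict String String) : Prop :=
  ∀ s w, tb.get? s = some w → ∃ t, PySem.Int.ofStr? s = some t ∧ w = pvHHMM t

theorem pvTabStep_inv (row : List String) (tb : PySem.Dict String String) (j : Nat)
    (h : pvTabInv tb) : pvTabInv (pvTabStep row tb j) := by
  unfold pvTabStep
  cases hg : row[j]? with
  | none => exact h
  | some s =>
    by_cases hc : (tb.get? s).isSome
    · simpa [hc] using h
    · simp only [hc, Bool.false_eq_true, if_false]
      cases hp : PySem.Int.ofStr? s with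
      | none => exact h
      | some t =>
        intro s' w hw
        rw [PySem.Dict.get?_insert] at hw
        by_cases he : s' = s
        · subst he
          rw [if_pos rfl] at hw
          exact ⟨t, hp, (Option.some_inj.mp hw).symm⟩
        · rw [if_neg he] at hw
          exact h s' w hw

theorem pv_foldl_pres {α β : Type} (P : β → Prop) (f : β → α → β)
    (hstep : ∀ b a, P b → P (f b a)) : ∀ (l : List α) (b : β), P b → P (l.foldl f b) := by
  intro l
  induction l with
  | nil => intro b hb; exact hb
  | cons x xs ih => intro b hb; exact ih _ (hstep _ _ hb)

theorem pvBuildTable_inv (all_rows : List (List String)) (ids : List Nat) :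
    pvTabInv (pvBuildTable all_rows ids) := by
  unfold pvBuildTable
  refine pv_foldl_pres _ _ ?_ all_rows _ ?_
  · intro tb row h
    exact pv_foldl_pres _ _ (fun tb j h => pvTabStep_inv row tb j h) ids tb h
  · intro s w hw
    simp [PySem.Dict.get?_empty] at hw

-- contains is monotone along the table-building loop
theorem pvTabStep_mono (row : List String) (tb : PySem.Dict String String) (j : Nat)
    (s : String) (h : (tb.get? s).isSome) : ((pvTabStep row tb j).get? s).isSome := by
  unfold pvTabStep
  cases row[j]? with
  | none => exact h
  | some s' =>
    by_cases hc : (tb.get? s').isSome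
    · simp [hc, h]
    · simp only [hc, Bool.false_eq_true, if_false]
      cases PySem.Int.ofStr? s' with
      | none => exact h
      | some t =>
        rw [PySem.Dict.get?_insert]
        split
        · simp
        · exact h

-- after the row loop over ids, every OK cell of that row is a key
theorem pvRowLoop_complete (row : List String) (s : String) :
    ∀ (ids : List Nat) (tb : PySem.Dict String String) (j : Nat), j ∈ ids →
    row[j]? = some s → (PySem.Int.ofStr? s).isSome →
    ((ids.foldl (pvTabStep row) tb).get? s).isSome := by
  intro ids
  induction ids with
  | nil => intro tb j hj; cases hj
  | cons i rest ih =>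
    intro tb j hj hg hp
    rcases List.mem_cons.mp hj with hj | hj
    · subst hj
      refine pv_foldl_pres _ _ (fun tb a h => pvTabStep_mono row tb a s h) rest _ ?_
      unfold pvTabStep
      rw [hg]
      by_cases hc : (tb.get? s).isSome
      · simp [hc]
      · simp only [hc, Bool.false_eq_true, if_false]
        cases hps : PySem.Int.ofStr? s with
        | none => rw [hps] at hp; simp at hp
        | some t => rw [PySem.Dict.get?_insert, if_pos rfl]; simp
    · exact ih _ j hj hg hp

-- every OK cell of every row is a key of the finished table (generalized over the start table)
theorem pvBuildTable_complete_gen (ids : List Nat) (s : String) (j : Nat) (hj : j ∈ ids)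
    (hp : (PySem.Int.ofStr? s).isSome) :
    ∀ (rows : List (List String)) (tb : PySem.Dict String String) (row : List String),
    row ∈ rows → row[j]? = some s →
    ((rows.foldl (fun tb row => ids.foldl (pvTabStep row) tb) tb).get? s).isSome := by
  intro rows
  induction rows with
  | nil => intro tb row h; cases h
  | cons r rs ih =>
    intro tb row hrow hg
    simp only [List.foldl_cons]
    rcases List.mem_cons.mp hrow with hr | hr
    · subst hr
      refine pv_foldl_pres (fun (tb : PySem.Dict String String) => ((tb.get? s).isSome = true)) _ ?_ rs _
        (pvRowLoop_complete row s ids tb j hj hg hp)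
      intro tb r' h
      exact pv_foldl_pres (fun (tb : PySem.Dict String String) => ((tb.get? s).isSome = true)) _
        (fun tb a h => pvTabStep_mono r' tb a s h) ids tb h
    · exact ih _ row hr hg

theorem pvBuildTable_complete (all_rows : List (List String)) (ids : List Nat)
    (row : List String) (hrow : row ∈ all_rows) (j : Nat) (hj : j ∈ ids)
    (s : String) (hg : row[j]? = some s) (hp : (PySem.Int.ofStr? s).isSome) :
    ((pvBuildTable all_rows ids).get? s).isSome := by
  unfold pvBuildTable
  exact pvBuildTable_complete_gen ids s j hj hp all_rows PySem.Dict.empty row hrow hg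

-- under an OK cell, B's lookup step is the reference cell rewrite
theorem pvLookStep_eq (all_rows : List (List String)) (ids : List Nat)
    (row r : List String) (hrow : row ∈ all_rows) (j : Nat) (hj : j ∈ ids)
    (s : String) (t : Int) (hg : row[j]? = some s) (hr : r[j]? = some s)
    (hp : PySem.Int.ofStr? s = some t) :
    pvLookStep (pvBuildTable all_rows ids) r j = r.set j (pvHHMM t) := by
  have hsome := pvBuildTable_complete all_rows ids row hrow j hj s hg (by simp [hp])
  obtain ⟨w, hw⟩ := Option.isSome_iff_exists.mp hsome
  obtain ⟨t', hp', hwv⟩ := pvBuildTable_inv all_rows ids s w hw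
  rw [hp] at hp'
  obtain rfl : t = t' := Option.some_inj.mp hp'
  unfold pvLookStep
  rw [hr]
  show (match (pvBuildTable all_rows ids).get? s with
        | none => r
        | some w => r.set j w) = r.set j (pvHHMM t)
  rw [hw, hwv]

-- fields of pvCellOK
theorem pvCellOK_elim (row : List String) (j : Nat) (h : pvCellOK row j = true) :
    ∃ s t, row[j]? = some s ∧ PySem.Int.ofStr? s = some t := by
  cases hg : row[j]? with
  | none => simp [pvCellOK, hg] at h
  | some s =>
    cases hp : PySem.Int.ofStr? s with
    | none => simp [pvCellOK, hg, hp] at h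
    | some t => exact ⟨s, t, rfl, hp⟩

-- distinct names both present have distinct first indices
theorem pvIdx_ne (clmn : List String) (h1 : "leaveAt" ∈ clmn) (h2 : "arriveBy" ∈ clmn) :
    clmn.idxOf "leaveAt" ≠ clmn.idxOf "arriveBy" := by
  intro h
  have e1 : clmn[clmn.idxOf "leaveAt"]? = some "leaveAt" := by
    rw [List.getElem?_eq_getElem (List.idxOf_lt_length_of_mem h1)]
    exact congrArg some (List.getElem_idxOf _)
  have e2 : clmn[clmn.idxOf "arriveBy"]? = some "arriveBy" := by
    rw [List.getElem?_eq_getElem (List.idxOf_lt_length_of_mem h2)]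
    exact congrArg some (List.getElem_idxOf _)
  rw [h, e2] at e1
  exact absurd (Option.some_inj.mp e1) (by decide)

-- ===== VERDICT (by name: the statement is the Claim_ definition above) =====
theorem convert_time_int_to_time_spec : Claim_equal_convert_time_int_to_time := by
  intro all_rows clmn _dom pre
  obtain ⟨pre1, pre2⟩ := pre
  unfold Spec_convert_time_int_to_time convert_time_int_to_time convert_time_int_to_time_alt
  simp only []
  by_cases h1 : "leaveAt" ∈ clmn <;> by_cases h2 : "arriveBy" ∈ clmn
  · -- both columns present
    have hla : clmn.idxOf "leaveAt" ≠ clmn.idxOf "arriveBy" := pvIdx_ne clmn h1 h2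
    have hids : (["leaveAt", "arriveBy"].filter (· ∈ clmn)).map (fun name => clmn.idxOf name)
        = [clmn.idxOf "leaveAt", clmn.idxOf "arriveBy"] := by
      simp [List.filter, h1, h2]
    rw [if_pos h1, if_pos h2, if_pos (pvIdx_ne_neg_one clmn "leaveAt"),
        if_pos (pvIdx_ne_neg_one clmn "arriveBy"), hids]
    rw [pvPassA_eq, pvPassA_eq, List.map_map]
    refine List.map_congr_left ?_
    intro row hrow
    obtain ⟨sl, tl, hgl, hpl⟩ := pvCellOK_elim row _ (pre1 h1 row hrow)
    obtain ⟨sa, ta, hga, hpa⟩ := pvCellOK_elim row _ (pre2 h2 row hrow)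
    have hga' : (row.set (clmn.idxOf "leaveAt") (pvHHMM tl))[clmn.idxOf "arriveBy"]? = some sa := by
      rw [List.getElem?_set_ne hla]; exact hga
    have c1 := pvCellConv_eq row _ sl tl hgl hpl
    have c2 := pvCellConv_eq (row.set (clmn.idxOf "leaveAt") (pvHHMM tl)) _ sa ta hga' hpa
    have b1 := pvLookStep_eq all_rows [clmn.idxOf "leaveAt", clmn.idxOf "arriveBy"] row row hrow
      (clmn.idxOf "leaveAt") (by simp) sl tl hgl hgl hpl
    have b2 := pvLookStep_eq all_rows [clmn.idxOf "leaveAt", clmn.idxOf "arriveBy"] row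
      (row.set (clmn.idxOf "leaveAt") (pvHHMM tl)) hrow (clmn.idxOf "arriveBy") (by simp)
      sa ta hga hga' hpa
    simp only [Function.comp, List.foldl_cons, List.foldl_nil, c1, c2, b1, b2]
  · -- only leaveAt present
    have hids : (["leaveAt", "arriveBy"].filter (· ∈ clmn)).map (fun name => clmn.idxOf name)
        = [clmn.idxOf "leaveAt"] := by
      simp [List.filter, h1, h2]
    rw [if_pos h1, if_neg h2, if_pos (pvIdx_ne_neg_one clmn "leaveAt"),
        if_neg (by simp : ¬ ((-1 : Int) ≠ -1)), hids]
    rw [pvPassA_eq]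
    refine List.map_congr_left ?_
    intro row hrow
    obtain ⟨sl, tl, hgl, hpl⟩ := pvCellOK_elim row _ (pre1 h1 row hrow)
    have c1 := pvCellConv_eq row _ sl tl hgl hpl
    have b1 := pvLookStep_eq all_rows [clmn.idxOf "leaveAt"] row row hrow
      (clmn.idxOf "leaveAt") (by simp) sl tl hgl hgl hpl
    simp only [List.foldl_cons, List.foldl_nil, c1, b1]
  · -- only arriveBy present
    have hids : (["leaveAt", "arriveBy"].filter (· ∈ clmn)).map (fun name => clmn.idxOf name)
        = [clmn.idxOf "arriveBy"] := by
      simp [List.filter, h1, h2]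
    rw [if_neg h1, if_pos h2, if_neg (by simp : ¬ ((-1 : Int) ≠ -1)),
        if_pos (pvIdx_ne_neg_one clmn "arriveBy"), hids]
    rw [pvPassA_eq]
    refine List.map_congr_left ?_
    intro row hrow
    obtain ⟨sa, ta, hga, hpa⟩ := pvCellOK_elim row _ (pre2 h2 row hrow)
    have c1 := pvCellConv_eq row _ sa ta hga hpa
    have b1 := pvLookStep_eq all_rows [clmn.idxOf "arriveBy"] row row hrow
      (clmn.idxOf "arriveBy") (by simp) sa ta hga hga hpa
    simp only [List.foldl_cons, List.foldl_nil, c1, b1]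
  · -- neither present
    have hids : (["leaveAt", "arriveBy"].filter (· ∈ clmn)).map (fun name => clmn.idxOf name)
        = ([] : List Nat) := by
      simp [List.filter, h1, h2]
    rw [if_neg h1, if_neg h2, if_neg (by simp : ¬ ((-1 : Int) ≠ -1)),
        if_neg (by simp : ¬ ((-1 : Int) ≠ -1)), hids]
    simp
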